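-- pv_equiv track=rewrite | github.com/MacySalvado/HIT137_2024_S2_Group109 | MacysFolder/Q2_chapter2.py | separate_and_convert
-- ===== SOURCE A (Python) =====
-- def separate_and_convert(s):
--     number_string = ''.join([char for char in s if char.isdigit()])
--     letter_string = ''.join([char for char in s if char.isalpha()])
--
--     # Convert even numbers to ASCII code decimal values
--     even_numbers = [char for char in number_string if int(char) % 2 == 0]
--     even_numbers_ascii = [ord(char) for char in even_numbers]
--     converted_numbers = ''.join([str(ord(char)) if int(char) % 2 == 0 else char for char in number_string])
--
--     # Convert uppercase letters to ASCII code decimal values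
--     uppercase_letters = [char for char in letter_string if char.isupper()]
--     uppercase_letters_ascii = [ord(char) for char in uppercase_letters]
--     converted_letters = ''.join([str(ord(char)) if char.isupper() else char for char in letter_string])
--
--     return number_string, letter_string, converted_numbers, converted_letters, even_numbers, even_numbers_ascii, uppercase_letters, uppercase_letters_ascii
-- ===== SOURCE B (Python) =====
-- def separate_and_convert(s):
--     number_string = []
--     letter_string = []
--     converted_numbers = []
--     converted_letters = []
--     even_numbers = []
--     even_numbers_ascii = []
--     uppercase_letters = []
--     uppercase_letters_ascii = []
--     for char in s:
--         if char.isdigit():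
--             number_string.append(char)
--             if int(char) % 2 == 0:
--                 converted_numbers.append(str(ord(char)))
--                 even_numbers.append(char)
--                 even_numbers_ascii.append(ord(char))
--             else:
--                 converted_numbers.append(char)
--         elif char.isalpha():
--             letter_string.append(char)
--             if char.isupper():
--                 converted_letters.append(str(ord(char)))
--                 uppercase_letters.append(char)
--                 uppercase_letters_ascii.append(ord(char))
--             else:
--                 converted_letters.append(char)
--     return (''.join(number_string), ''.join(letter_string),
--             ''.join(converted_numbers), ''.join(converted_letters),
--             even_numbers, even_numbers_ascii,
--             uppercase_letters, uppercase_letters_ascii)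
-- ===== Notes on version B (the rewrite author's own statement) =====
-- stated objective: alternative
-- what changed: Replaces A's eight separate list-comprehension passes (two over s, six over intermediate strings) with a single loop over s that maintains all eight accumulators at once.
import Mathlib
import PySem

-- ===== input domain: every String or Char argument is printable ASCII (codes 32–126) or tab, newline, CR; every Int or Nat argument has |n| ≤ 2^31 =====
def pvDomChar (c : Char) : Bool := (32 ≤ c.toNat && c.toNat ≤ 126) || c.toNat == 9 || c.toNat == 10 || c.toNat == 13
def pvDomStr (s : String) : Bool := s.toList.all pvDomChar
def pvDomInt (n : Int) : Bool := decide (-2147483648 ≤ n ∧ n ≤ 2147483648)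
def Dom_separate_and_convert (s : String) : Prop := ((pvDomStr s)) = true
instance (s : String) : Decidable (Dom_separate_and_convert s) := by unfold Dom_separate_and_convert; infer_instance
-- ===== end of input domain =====

-- B replaces A's eight separate comprehension passes with one loop over s that
-- maintains all eight accumulators at once (single pass, same return value).

-- ===== PORT A =====
-- int(char) for a digit char is its code minus 48; Python's % is PySem.Int.mod.
def sacEven (c : Char) : Bool := PySem.Int.mod ((c.toNat : Int) - 48) 2 == 0

def separate_and_convert (s : String) : String × String × String × String × List String × List Int × List String × List Int :=
  let number_string := s.toList.filter PySem.Chars.isdigit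
  let letter_string := s.toList.filter PySem.Chars.isalpha
  let even_numbers := number_string.filter sacEven
  let even_numbers_ascii := even_numbers.map (fun c => (c.toNat : Int))
  let converted_numbers :=
    (number_string.map (fun c => if sacEven c then PySem.Int.toChars (c.toNat : Int) else [c])).flatten
  let uppercase_letters := letter_string.filter PySem.Chars.isupper
  let uppercase_letters_ascii := uppercase_letters.map (fun c => (c.toNat : Int))
  let converted_letters :=
    (letter_string.map (fun c => if PySem.Chars.isupper c then PySem.Int.toChars (c.toNat : Int) else [c])).flatten
  (String.ofList number_string, String.ofList letter_string,
   String.ofList converted_numbers, String.ofList converted_letters,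
   even_numbers.map (fun c => String.ofList [c]), even_numbers_ascii,
   uppercase_letters.map (fun c => String.ofList [c]), uppercase_letters_ascii)

-- ===== PORT B =====
-- single-pass state: (number, letter, converted_numbers, converted_letters,
--                     even, even_ascii, upper, upper_ascii)
def sacStep (st : List Char × List Char × List Char × List Char × List String × List Int × List String × List Int)
    (c : Char) : List Char × List Char × List Char × List Char × List String × List Int × List String × List Int :=
  match st with
  | (ns, ls, cn, cl, en, ena, ul, ula) =>
    if PySem.Chars.isdigit c then
      if sacEven c then
        (ns ++ [c], ls, cn ++ PySem.Int.toChars (c.toNat : Int), cl,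
         en ++ [String.ofList [c]], ena ++ [(c.toNat : Int)], ul, ula)
      else
        (ns ++ [c], ls, cn ++ [c], cl, en, ena, ul, ula)
    else if PySem.Chars.isalpha c then
      if PySem.Chars.isupper c then
        (ns, ls ++ [c], cn, cl ++ PySem.Int.toChars (c.toNat : Int),
         en, ena, ul ++ [String.ofList [c]], ula ++ [(c.toNat : Int)])
      else
        (ns, ls ++ [c], cn, cl ++ [c], en, ena, ul, ula)
    else (ns, ls, cn, cl, en, ena, ul, ula)

def separate_and_convert_alt (s : String) : String × String × String × String × List String × List Int × List String × List Int :=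
  match s.toList.foldl sacStep ([], [], [], [], [], [], [], []) with
  | (ns, ls, cn, cl, en, ena, ul, ula) =>
    (String.ofList ns, String.ofList ls, String.ofList cn, String.ofList cl, en, ena, ul, ula)

-- ===== PRECONDITION & SPEC =====
def Spec_separate_and_convert (s : String) (out : String × String × String × String × List String × List Int × List String × List Int) : Prop := out = separate_and_convert_alt s
instance (s : String) (out : String × String × String × String × List String × List Int × List String × List Int) : Decidable (Spec_separate_and_convert s out) := by
  unfold Spec_separate_and_convert
  haveI : DecidableEq (List String × List Int) := instDecidableEqProd
  haveI : DecidableEq (List Int × List String × List Int) := instDecidableEqProd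
  haveI : DecidableEq (List String × List Int × List String × List Int) := instDecidableEqProd
  haveI : DecidableEq (String × List String × List Int × List String × List Int) := instDecidableEqProd
  haveI : DecidableEq (String × String × List String × List Int × List String × List Int) := instDecidableEqProd
  haveI : DecidableEq (String × String × String × List String × List Int × List String × List Int) := instDecidableEqProd
  infer_instance

-- ===== CLAIM (what is proved, stated in full; the proofs are below) =====
def Claim_equal_separate_and_convert : Prop := ∀ (s : String), Dom_separate_and_convert s → Spec_separate_and_convert s (separate_and_convert s)

-- ===== LEMMAS AND PROOFS =====

theorem sac_digit_not_alpha {c : Char} (h : PySem.Chars.isdigit c = true) :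
    PySem.Chars.isalpha c = false := by
  have h9 : '9'.val.toNat = 57 := by decide
  have hA : 'A'.val.toNat = 65 := by decide
  have ha : 'a'.val.toNat = 97 := by decide
  simp only [PySem.Chars.isdigit, PySem.Chars.isalpha, PySem.Chars.isupper, PySem.Chars.islower,
    Bool.and_eq_true, decide_eq_true_eq, Char.le_def, UInt32.le_iff_toNat_le, h9, hA, ha] at *
  simp only [Bool.or_eq_false_iff, Bool.and_eq_false_iff]
  constructor <;> [left; left] <;>
    simp only [decide_eq_false_iff_not, not_le] <;> omega

theorem sac_foldl (cs : List Char)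
    (ns ls cn cl : List Char) (en : List String) (ena : List Int) (ul : List String) (ula : List Int) :
    cs.foldl sacStep (ns, ls, cn, cl, en, ena, ul, ula) =
      (ns ++ cs.filter PySem.Chars.isdigit,
       ls ++ cs.filter PySem.Chars.isalpha,
       cn ++ ((cs.filter PySem.Chars.isdigit).map (fun c => if sacEven c then PySem.Int.toChars (c.toNat : Int) else [c])).flatten,
       cl ++ ((cs.filter PySem.Chars.isalpha).map (fun c => if PySem.Chars.isupper c then PySem.Int.toChars (c.toNat : Int) else [c])).flatten,
       en ++ ((cs.filter PySem.Chars.isdigit).filter sacEven).map (fun c => String.ofList [c]),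
       ena ++ ((cs.filter PySem.Chars.isdigit).filter sacEven).map (fun c => (c.toNat : Int)),
       ul ++ ((cs.filter PySem.Chars.isalpha).filter PySem.Chars.isupper).map (fun c => String.ofList [c]),
       ula ++ ((cs.filter PySem.Chars.isalpha).filter PySem.Chars.isupper).map (fun c => (c.toNat : Int))) := by
  induction cs generalizing ns ls cn cl en ena ul ula with
  | nil => simp
  | cons c cs ih =>
    by_cases hd : PySem.Chars.isdigit c = true
    · have ha := sac_digit_not_alpha hd
      by_cases he : sacEven c = true
      · simp [List.foldl_cons, sacStep, hd, ha, he, ih]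
      · simp [List.foldl_cons, sacStep, hd, ha, he, ih]
    · by_cases ha : PySem.Chars.isalpha c = true
      · by_cases hu : PySem.Chars.isupper c = true
        · simp [List.foldl_cons, sacStep, hd, ha, hu, ih]
        · simp [List.foldl_cons, sacStep, hd, ha, hu, ih]
      · simp [List.foldl_cons, sacStep, hd, ha, ih]

-- ===== VERDICT (by name: the statement is the Claim_ definition above) =====
theorem separate_and_convert_spec : Claim_equal_separate_and_convert := by
  intro s _
  unfold Spec_separate_and_convert separate_and_convert separate_and_convert_alt
  rw [sac_foldl]
  simp
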